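-- pv_equiv track=rewrite | github.com/netra-systems/zen | tests/integration/edge_cases_error_scenarios/test_websocket_message_ordering_corruption.py | _verify_message_ordering
-- ===== SOURCE A (Python) =====
-- from typing import Dict, List, Optional, Any
--
-- def _verify_message_ordering(sent_messages: List[Dict], received_messages: List[Dict], pattern: str) -> bool:
--     """Verify message ordering based on pattern."""
--     if len(sent_messages) != len(received_messages):
--         return False
--
--     if pattern in ['sequential', 'burst', 'mixed_types']:
--         # Messages should be in same order as sent
--         for i, (sent, received) in enumerate(zip(sent_messages, received_messages)):
--             if sent['id'] != received['id']:
--                 return False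
--
--     elif pattern == 'concurrent':
--         # Messages from each sender should be in order
--         sender_groups = {}
--         for msg in received_messages:
--             sender_id = msg.get('sender_id')
--             if sender_id not in sender_groups:
--                 sender_groups[sender_id] = []
--             sender_groups[sender_id].append(msg)
--
--         # Verify each sender's messages are in sequence order
--         for sender_id, messages in sender_groups.items():
--             for i, msg in enumerate(messages):
--                 if msg['sequence'] != i:
--                     return False
--
--     return True
-- ===== SOURCE B (Python) =====
-- from typing import Dict, List, Optional, Any
--
-- def _verify_message_ordering(sent_messages: List[Dict], received_messages: List[Dict], pattern: str) -> bool: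
--     """Verify message ordering based on pattern (single-pass counter version)."""
--     if len(sent_messages) != len(received_messages):
--         return False
--
--     if pattern in ('sequential', 'burst', 'mixed_types'):
--         return all(s['id'] == r['id'] for s, r in zip(sent_messages, received_messages))
--
--     if pattern == 'concurrent':
--         # One pass: per-sender counter of the next expected sequence number,
--         # instead of grouping messages into per-sender lists and re-scanning them.
--         expected = {}
--         for msg in received_messages:
--             sid = msg.get('sender_id')
--             nxt = expected.get(sid, 0)
--             if msg['sequence'] != nxt:
--                 return False
--             expected[sid] = nxt + 1
--
--     return True
-- ===== Notes on version B (the rewrite author's own statement) =====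
-- stated objective: simpler
-- what changed: The 'concurrent' branch's two phases (build a dict of per-sender message lists, then re-scan each list against its enumerate index) are fused into one pass that keeps only a per-sender counter of the next expected sequence number; the sequential branch becomes a single all() over the zipped pairs.
-- outside the precondition, e.g. on _verify_message_ordering([{'id': 0}, {}], [{'id': 1}, {}], 'sequential'): A returns False, B returns False; on _verify_message_ordering([{}, {}], [{'sequence': 1}, {}], 'concurrent'): A returns False, B returns False
import Mathlib
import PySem

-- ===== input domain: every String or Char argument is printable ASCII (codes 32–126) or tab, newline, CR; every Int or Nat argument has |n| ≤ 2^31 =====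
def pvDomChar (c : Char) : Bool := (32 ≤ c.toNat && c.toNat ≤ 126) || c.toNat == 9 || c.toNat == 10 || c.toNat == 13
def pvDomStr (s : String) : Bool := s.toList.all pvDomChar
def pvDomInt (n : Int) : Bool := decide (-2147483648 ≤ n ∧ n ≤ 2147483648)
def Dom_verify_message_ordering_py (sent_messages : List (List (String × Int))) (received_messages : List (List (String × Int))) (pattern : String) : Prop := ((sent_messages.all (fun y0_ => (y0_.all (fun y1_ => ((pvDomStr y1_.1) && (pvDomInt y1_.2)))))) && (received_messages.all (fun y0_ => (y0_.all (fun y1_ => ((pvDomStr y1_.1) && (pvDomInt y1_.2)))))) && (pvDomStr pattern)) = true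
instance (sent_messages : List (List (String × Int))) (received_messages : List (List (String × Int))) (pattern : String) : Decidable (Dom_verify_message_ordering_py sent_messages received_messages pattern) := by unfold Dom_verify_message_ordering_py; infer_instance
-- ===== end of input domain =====

-- B fuses A's two-phase 'concurrent' check (group per-sender lists, then re-scan each against its index)
-- into one pass keeping a per-sender counter of the next expected sequence number; objective: simpler.


-- ===== PORT A =====
-- msg['k'] / msg.get('k') on a dict argument (assoc list in insertion order)
def pvGetKey (m : List (String × Int)) (k : String) : Option Int := (PySem.Dict.mk m).get? k

-- A's sequential/burst/mixed_types loop: 'for sent, received in zip(...): if sent['id'] != received['id']: return False'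
def aSeqLoop : List ((List (String × Int)) × (List (String × Int))) → Bool
  | [] => true
  | (s, r) :: rest => if pvGetKey s "id" ≠ pvGetKey r "id" then false else aSeqLoop rest

-- A's grouping step: 'if sender_id not in sender_groups: sender_groups[sender_id] = []' then '.append(msg)'
def aGroupStep (g : PySem.Dict (Option Int) (List (List (String × Int)))) (msg : List (String × Int)) :
    PySem.Dict (Option Int) (List (List (String × Int))) :=
  let sid := pvGetKey msg "sender_id"
  let g' := if g.contains sid then g else g.insert sid []
  g'.modify sid [] (fun l => l ++ [msg])

-- A's inner verification loop: 'for i, msg in enumerate(messages): if msg['sequence'] != i: return False'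
def aCheckMsgs : List (List (String × Int)) → Int → Bool
  | [], _ => true
  | m :: rest, i => if pvGetKey m "sequence" ≠ some i then false else aCheckMsgs rest (i + 1)

def verify_message_ordering_py (sent_messages : List (List (String × Int))) (received_messages : List (List (String × Int))) (pattern : String) : Bool :=
  if sent_messages.length ≠ received_messages.length then false
  else if ["sequential", "burst", "mixed_types"].contains pattern then
    aSeqLoop (sent_messages.zip received_messages)
  else if pattern = "concurrent" then
    (received_messages.foldl aGroupStep PySem.Dict.empty).items.all (fun p => aCheckMsgs p.2 0)
  else true

-- ===== PORT B =====
-- B's fused single pass: per-sender counter of the next expected sequence number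
def bConcLoop : List (List (String × Int)) → PySem.Dict (Option Int) Int → Bool
  | [], _ => true
  | msg :: rest, expected =>
    let sid := pvGetKey msg "sender_id"
    let nxt := expected.getD sid 0
    if pvGetKey msg "sequence" ≠ some nxt then false
    else bConcLoop rest (expected.insert sid (nxt + 1))

def verify_message_ordering_py_alt (sent_messages : List (List (String × Int))) (received_messages : List (List (String × Int))) (pattern : String) : Bool :=
  if sent_messages.length ≠ received_messages.length then false
  else if ["sequential", "burst", "mixed_types"].contains pattern then
    (sent_messages.zip received_messages).all (fun p => pvGetKey p.1 "id" == pvGetKey p.2 "id")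
  else if pattern = "concurrent" then
    bConcLoop received_messages PySem.Dict.empty
  else true

-- ===== PRECONDITION & SPEC =====
-- Pre_ excludes inputs on which A's scan reaches a message missing the required 'id' (sequential-type
-- patterns) or 'sequence' ('concurrent') key, where A raises KeyError; for simplicity it requires the
-- key in every relevant message rather than only in those reached before the first mismatch, so it is
-- slightly narrower than A's exact raise set (A returns False on the cited excluded inputs, as does B).
def Pre_verify_message_ordering_py (sent_messages : List (List (String × Int))) (received_messages : List (List (String × Int))) (pattern : String) : Prop :=
  sent_messages.length = received_messages.length →
    ((["sequential", "burst", "mixed_types"].contains pattern = true →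
        ∀ p ∈ sent_messages.zip received_messages,
          (pvGetKey p.1 "id").isSome = true ∧ (pvGetKey p.2 "id").isSome = true) ∧
     (pattern = "concurrent" →
        ∀ m ∈ received_messages, (pvGetKey m "sequence").isSome = true))
instance (sent_messages : List (List (String × Int))) (received_messages : List (List (String × Int))) (pattern : String) : Decidable (Pre_verify_message_ordering_py sent_messages received_messages pattern) := by unfold Pre_verify_message_ordering_py; infer_instance

def pvWitness_verify_message_ordering_py : (List (List (String × Int))) × (List (List (String × Int))) × String :=
  ([[("id", 1)], [("id", 2)]], [[("id", 1)], [("id", 2)]], "sequential")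

def Spec_verify_message_ordering_py (sent_messages : List (List (String × Int))) (received_messages : List (List (String × Int))) (pattern : String) (out : Bool) : Prop := out = verify_message_ordering_py_alt sent_messages received_messages pattern
instance (sent_messages : List (List (String × Int))) (received_messages : List (List (String × Int))) (pattern : String) (out : Bool) : Decidable (Spec_verify_message_ordering_py sent_messages received_messages pattern out) := by unfold Spec_verify_message_ordering_py; infer_instance

-- ===== CLAIM (what is proved, stated in full; the proofs are below) =====
def Claim_equal_verify_message_ordering_py : Prop := ∀ (sent_messages : List (List (String × Int))) (received_messages : List (List (String × Int))) (pattern : String), Dom_verify_message_ordering_py sent_messages received_messages pattern → Pre_verify_message_ordering_py sent_messages received_messages pattern → Spec_verify_message_ordering_py sent_messages received_messages pattern (verify_message_ordering_py sent_messages received_messages pattern)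

-- ===== LEMMAS AND PROOFS =====

-- messages of l whose 'sender_id' lookup is sid (proof-side abbreviation)
def filtSid (sid : Option Int) (l : List (List (String × Int))) : List (List (String × Int)) :=
  l.filter (fun m => pvGetKey m "sender_id" == sid)

theorem aSeqLoop_eq_all (l : List ((List (String × Int)) × (List (String × Int)))) :
    aSeqLoop l = l.all (fun p => pvGetKey p.1 "id" == pvGetKey p.2 "id") := by
  induction l with
  | nil => rfl
  | cons p rest ih =>
    obtain ⟨s, r⟩ := p
    by_cases h : pvGetKey s "id" = pvGetKey r "id" <;> simp [aSeqLoop, h, ih]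

theorem filtSid_cons (sid : Option Int) (m : List (String × Int)) (l : List (List (String × Int))) :
    filtSid sid (m :: l) =
      if pvGetKey m "sender_id" = sid then m :: filtSid sid l else filtSid sid l := by
  by_cases h : pvGetKey m "sender_id" = sid <;> simp [filtSid, h]

theorem bConcLoop_iff (l : List (List (String × Int))) :
    ∀ e : PySem.Dict (Option Int) Int,
      (bConcLoop l e = true ↔ ∀ sid, aCheckMsgs (filtSid sid l) (e.getD sid 0) = true) := by
  induction l with
  | nil => intro e; simp [bConcLoop, filtSid, aCheckMsgs]
  | cons msg rest ih =>
    intro e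
    by_cases hseq :
        pvGetKey msg "sequence" = some (e.getD (pvGetKey msg "sender_id") 0)
    · have hb : bConcLoop (msg :: rest) e =
          bConcLoop rest (e.insert (pvGetKey msg "sender_id")
            (e.getD (pvGetKey msg "sender_id") 0 + 1)) := by
        simp only [bConcLoop]
        rw [if_neg (not_not_intro hseq)]
      rw [hb, ih]
      constructor
      · intro h sid
        rw [filtSid_cons]
        by_cases hsid : pvGetKey msg "sender_id" = sid
        · rw [if_pos hsid, ← hsid]
          simp only [aCheckMsgs]
          rw [if_neg (not_not_intro hseq)]
          have := h (pvGetKey msg "sender_id")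
          rwa [PySem.Dict.getD_insert, if_pos rfl] at this
        · rw [if_neg hsid]
          have := h sid
          rwa [PySem.Dict.getD_insert, if_neg (fun hc => hsid hc.symm)] at this
      · intro h sid
        by_cases hsid : sid = pvGetKey msg "sender_id"
        · rw [hsid, PySem.Dict.getD_insert, if_pos rfl]
          have := h (pvGetKey msg "sender_id")
          rw [filtSid_cons, if_pos rfl] at this
          simp only [aCheckMsgs] at this
          rwa [if_neg (not_not_intro hseq)] at this
        · rw [PySem.Dict.getD_insert, if_neg hsid]
          have := h sid
          rwa [filtSid_cons, if_neg (fun hc => hsid hc.symm)] at this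
    · have hb : bConcLoop (msg :: rest) e = false := by
        simp only [bConcLoop]
        rw [if_pos hseq]
      rw [hb]
      refine iff_of_false (by simp) ?_
      intro h
      have := h (pvGetKey msg "sender_id")
      rw [filtSid_cons, if_pos rfl] at this
      simp only [aCheckMsgs] at this
      rw [if_pos hseq] at this
      exact Bool.false_ne_true this

theorem aGroupStep_getD (g : PySem.Dict (Option Int) (List (List (String × Int))))
    (msg : List (String × Int)) (sid : Option Int) :
    (aGroupStep g msg).getD sid [] =
      if sid = pvGetKey msg "sender_id" then g.getD sid [] ++ [msg] else g.getD sid [] := by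
  unfold aGroupStep
  set s := pvGetKey msg "sender_id" with hs
  have hbase : ∀ x, (if g.contains s then g else g.insert s []).getD x [] = g.getD x [] := by
    intro x
    by_cases hc : g.contains s
    · simp [hc]
    · simp only [Bool.not_eq_true] at hc
      rw [if_neg (by simp [hc]), PySem.Dict.getD_insert]
      by_cases hx : x = s
      · subst hx; rw [if_pos rfl, PySem.Dict.getD_of_not_contains g [] hc]
      · rw [if_neg hx]
  rw [PySem.Dict.getD_modify]
  by_cases hx : sid = s
  · subst hx; simp [hbase]
  · simp [hx, hbase]

theorem aGroups_getD (l : List (List (String × Int))) :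
    ∀ (g : PySem.Dict (Option Int) (List (List (String × Int)))) (sid : Option Int),
      (l.foldl aGroupStep g).getD sid [] = g.getD sid [] ++ filtSid sid l := by
  induction l with
  | nil => intro g sid; simp [filtSid]
  | cons msg rest ih =>
    intro g sid
    rw [List.foldl_cons, ih, aGroupStep_getD, filtSid_cons]
    by_cases h : pvGetKey msg "sender_id" = sid
    · rw [if_pos h, if_pos h.symm, List.append_assoc]; rfl
    · rw [if_neg h, if_neg (fun hc => h hc.symm)]

theorem aGroupStep_keys (g : PySem.Dict (Option Int) (List (List (String × Int))))
    (msg : List (String × Int)) :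
    (aGroupStep g msg).keys =
      if g.contains (pvGetKey msg "sender_id") then g.keys
      else g.keys ++ [pvGetKey msg "sender_id"] := by
  unfold aGroupStep
  set s := pvGetKey msg "sender_id" with hs
  rw [PySem.Dict.keys_modify]
  by_cases hc : g.contains s
  · rw [if_pos hc, if_pos hc, PySem.Dict.keys_insert_of_contains _ _ hc]
  · simp only [Bool.not_eq_true] at hc
    rw [if_neg (by simp [hc]), if_neg (by simp [hc])]
    rw [PySem.Dict.keys_insert_of_contains _ _ (PySem.Dict.contains_insert_self g s []),
        PySem.Dict.keys_insert_of_not_contains g _ hc]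

theorem aGroups_keys_nodup (l : List (List (String × Int))) :
    ∀ (g : PySem.Dict (Option Int) (List (List (String × Int)))),
      g.keys.Nodup → (l.foldl aGroupStep g).keys.Nodup := by
  induction l with
  | nil => intro g h; exact h
  | cons msg rest ih =>
    intro g h
    rw [List.foldl_cons]
    apply ih
    rw [aGroupStep_keys]
    by_cases hc : g.contains (pvGetKey msg "sender_id")
    · rwa [if_pos hc]
    · simp only [Bool.not_eq_true] at hc
      rw [if_neg (by simp [hc])]
      have hnm : pvGetKey msg "sender_id" ∉ g.keys := by
        rw [← PySem.Dict.contains_iff_mem_keys]; simp [hc]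
      refine List.Nodup.append h (List.nodup_singleton _) ?_
      intro a ha hb
      rw [List.mem_singleton] at hb
      subst hb
      exact hnm ha

theorem aGroups_mem_keys (l : List (List (String × Int))) :
    ∀ (g : PySem.Dict (Option Int) (List (List (String × Int)))) (sid : Option Int),
      (sid ∈ (l.foldl aGroupStep g).keys ↔
        sid ∈ g.keys ∨ ∃ m ∈ l, pvGetKey m "sender_id" = sid) := by
  induction l with
  | nil => intro g sid; simp
  | cons msg rest ih =>
    intro g sid
    rw [List.foldl_cons, ih]
    have hstep : sid ∈ (aGroupStep g msg).keys ↔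
        sid ∈ g.keys ∨ pvGetKey msg "sender_id" = sid := by
      rw [aGroupStep_keys]
      by_cases hc : g.contains (pvGetKey msg "sender_id")
      · rw [if_pos hc]
        constructor
        · exact Or.inl
        · rintro (h | h)
          · exact h
          · rw [← h]; exact (PySem.Dict.contains_iff_mem_keys g _).mp hc
      · simp only [Bool.not_eq_true] at hc
        rw [if_neg (by simp [hc])]
        simp [eq_comm, or_comm]
    rw [hstep]
    simp only [List.mem_cons]
    constructor
    · rintro ((h | h) | ⟨m, hm, hsid⟩)
      · exact Or.inl h
      · exact Or.inr ⟨msg, Or.inl rfl, h⟩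
      · exact Or.inr ⟨m, Or.inr hm, hsid⟩
    · rintro (h | ⟨m, (rfl | hm), hsid⟩)
      · exact Or.inl (Or.inl h)
      · exact Or.inl (Or.inr hsid)
      · exact Or.inr ⟨m, hm, hsid⟩

theorem filtSid_eq_nil_of_not_sender (l : List (List (String × Int))) (sid : Option Int)
    (h : ∀ m ∈ l, pvGetKey m "sender_id" ≠ sid) : filtSid sid l = [] := by
  simp only [filtSid, List.filter_eq_nil_iff]
  intro m hm
  simpa using h m hm

theorem aConc_eq_bConc (recv : List (List (String × Int))) :
    (recv.foldl aGroupStep PySem.Dict.empty).items.all (fun p => aCheckMsgs p.2 0) =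
      bConcLoop recv PySem.Dict.empty := by
  have hnodup : (recv.foldl aGroupStep PySem.Dict.empty).keys.Nodup :=
    aGroups_keys_nodup recv _ PySem.Dict.nodup_keys_empty
  rw [PySem.Dict.items_eq_map_keys _ hnodup []]
  have hiff :
      ((recv.foldl aGroupStep PySem.Dict.empty).keys.map
          (fun k => (k, (recv.foldl aGroupStep PySem.Dict.empty).getD k []))).all
        (fun p => aCheckMsgs p.2 0) = true ↔
      bConcLoop recv PySem.Dict.empty = true := by
    rw [List.all_map, List.all_eq_true, bConcLoop_iff]
    constructor
    · intro h sid
      simp only [PySem.Dict.getD_empty]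
      by_cases hmem : sid ∈ (recv.foldl aGroupStep PySem.Dict.empty).keys
      · have := h sid hmem
        simp only [Function.comp] at this
        rwa [aGroups_getD, PySem.Dict.getD_empty, List.nil_append] at this
      · have hnosender : ∀ m ∈ recv, pvGetKey m "sender_id" ≠ sid := by
          intro m hm hc
          exact hmem ((aGroups_mem_keys recv _ sid).mpr (Or.inr ⟨m, hm, hc⟩))
        rw [filtSid_eq_nil_of_not_sender recv sid hnosender]
        rfl
    · intro h sid _
      have := h sid
      simp only [PySem.Dict.getD_empty] at this
      simp only [Function.comp]
      rwa [aGroups_getD, PySem.Dict.getD_empty, List.nil_append]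
  cases ha : ((recv.foldl aGroupStep PySem.Dict.empty).keys.map
      (fun k => (k, (recv.foldl aGroupStep PySem.Dict.empty).getD k []))).all
        (fun p => aCheckMsgs p.2 0) <;>
    cases hb : bConcLoop recv PySem.Dict.empty
  · rfl
  · exact absurd (hiff.mpr hb) (by simp [ha])
  · exact absurd (hiff.mp ha) (by simp [hb])
  · rfl

-- ===== VERDICT (by name: the statement is the Claim_ definition above) =====
theorem verify_message_ordering_py_spec : Claim_equal_verify_message_ordering_py := by
  intro sent recv pattern _ _
  unfold Spec_verify_message_ordering_py verify_message_ordering_py verify_message_ordering_py_alt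
  by_cases hlen : sent.length ≠ recv.length
  · rw [if_pos hlen, if_pos hlen]
  · rw [if_neg hlen, if_neg hlen]
    by_cases hseq : ["sequential", "burst", "mixed_types"].contains pattern
    · rw [if_pos hseq, if_pos hseq, aSeqLoop_eq_all]
    · rw [if_neg hseq, if_neg hseq]
      by_cases hconc : pattern = "concurrent"
      · rw [if_pos hconc, if_pos hconc, aConc_eq_bConc]
      · rw [if_neg hconc, if_neg hconc]
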